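-- pv_equiv track=rewrite | github.com/Shahar2Hillel/VisionSDS-Project | prepare_dataset.py | build_flip_idx
-- ===== SOURCE A (Python) =====
-- def build_flip_idx(kpt_names: list[str]) -> list[int]:
--     """
--     Build horizontal-flip index mapping for YOLOv8 pose.
--     Each i maps to the index that keypoint i should swap with under H-flip.
--     Non-paired (midline) points map to themselves.
--     """
--     name_to_idx = {n: i for i, n in enumerate(kpt_names)}
--     flip = [i for i in range(len(kpt_names))]  # default: self
--
--     def counterpart(name: str) -> str | None:
--         # Generic *_left <-> *_right swap
--         if name.endswith("_left"):
--             return name[:-5] + "_right"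
--         if name.endswith("_right"):
--             return name[:-6] + "_left"
--         # Common aliases
--         aliases = {
--             "top_left": "top_right", "top_right": "top_left",
--             "mid_left": "mid_right", "mid_right": "mid_left",
--             "middle_left": "middle_right", "middle_right": "middle_left",
--             "bottom_left": "bottom_right", "bottom_right": "bottom_left",
--         }
--         return aliases.get(name, None)
--
--     for i, n in enumerate(kpt_names):
--         c = counterpart(n)
--         if c is not None and c in name_to_idx:
--             flip[i] = name_to_idx[c]
--         else:
--             flip[i] = i  # midline / unpaired stays the same
--
--     return flip
-- ===== SOURCE B (Python) =====
-- def build_flip_idx(kpt_names: list[str]) -> list[int]: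
--     """Group keypoints by (base, side) parsed from a trailing _left/_right,
--     then read each counterpart straight out of the group table."""
--     def parse(name):
--         if name.endswith("_left"):
--             return name[:-5], True      # True = left side
--         if name.endswith("_right"):
--             return name[:-6], False     # False = right side
--         return None
--
--     groups = {}
--     for i, n in enumerate(kpt_names):
--         p = parse(n)
--         if p is not None:
--             groups[p] = i               # later index overwrites earlier
--
--     def flip_of(i, n):
--         p = parse(n)
--         if p is None:
--             return i
--         base, side = p
--         return groups.get((base, not side), i)
--
--     return [flip_of(i, n) for i, n in enumerate(kpt_names)]
-- ===== Notes on version B (the rewrite author's own statement) =====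
-- stated objective: simpler
-- what changed: Instead of building a name-to-index dict and synthesizing each keypoint's counterpart name string (plus an unreachable aliases table), B parses every name once into a (base, side) key, groups indices by that key, and reads the opposite side straight from the group table; the aliases dict is dropped since all its keys already end in _left/_right.
import Mathlib
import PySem

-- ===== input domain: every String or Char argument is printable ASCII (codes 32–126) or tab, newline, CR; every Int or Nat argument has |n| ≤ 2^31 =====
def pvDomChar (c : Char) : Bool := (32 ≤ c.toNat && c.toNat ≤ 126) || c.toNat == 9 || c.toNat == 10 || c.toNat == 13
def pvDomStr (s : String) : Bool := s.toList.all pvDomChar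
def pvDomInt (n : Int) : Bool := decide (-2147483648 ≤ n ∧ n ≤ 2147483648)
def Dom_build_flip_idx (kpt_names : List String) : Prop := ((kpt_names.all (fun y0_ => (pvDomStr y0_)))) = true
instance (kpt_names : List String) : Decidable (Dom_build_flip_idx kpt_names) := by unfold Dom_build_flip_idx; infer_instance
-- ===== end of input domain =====

-- B groups keypoint indices by a parsed (base, side) key instead of building a
-- name→index dict and synthesizing counterpart name strings; the unreachable
-- aliases table of A is dropped.  Objective: simpler.

-- ===== PORT A =====
def bfiAliases : PySem.Dict String String :=
  PySem.Dict.ofList [("top_left", "top_right"), ("top_right", "top_left"),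
    ("mid_left", "mid_right"), ("mid_right", "mid_left"),
    ("middle_left", "middle_right"), ("middle_right", "middle_left"),
    ("bottom_left", "bottom_right"), ("bottom_right", "bottom_left")]

def bfiCounterpart (name : String) : Option String :=
  if PySem.Str.endswith name "_left" then
    some (String.ofList (PySem.List.slice name.toList none (some (-5)) ++ "_right".toList))
  else if PySem.Str.endswith name "_right" then
    some (String.ofList (PySem.List.slice name.toList none (some (-6)) ++ "_left".toList))
  else bfiAliases.get? name

def build_flip_idx (kpt_names : List String) : List Int :=
  let name_to_idx : PySem.Dict String Int :=
    (PySem.List.enumerate kpt_names).foldl (fun d p => d.insert p.2 p.1) PySem.Dict.empty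
  let flip0 : List Int := PySem.List.pyRange 0 (kpt_names.length : Int) 1
  (PySem.List.enumerate kpt_names).foldl
    (fun flip p =>
      match bfiCounterpart p.2 with
      | some c =>
          if name_to_idx.contains c then flip.set p.1.toNat ((name_to_idx.get? c).getD 0)
          else flip.set p.1.toNat p.1
      | none => flip.set p.1.toNat p.1)
    flip0

-- ===== PORT B =====
def bfiParse (name : String) : Option (String × Bool) :=
  if PySem.Str.endswith name "_left" then
    some (String.ofList (PySem.List.slice name.toList none (some (-5))), true)
  else if PySem.Str.endswith name "_right" then
    some (String.ofList (PySem.List.slice name.toList none (some (-6))), false)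
  else none

def build_flip_idx_alt (kpt_names : List String) : List Int :=
  let groups : PySem.Dict (String × Bool) Int :=
    (PySem.List.enumerate kpt_names).foldl
      (fun d p => match bfiParse p.2 with
        | some k => d.insert k p.1
        | none => d) PySem.Dict.empty
  (PySem.List.enumerate kpt_names).map
    (fun p => match bfiParse p.2 with
      | some (base, side) => groups.getD (base, !side) p.1
      | none => p.1)

-- ===== PRECONDITION & SPEC =====
def Spec_build_flip_idx (kpt_names : List String) (out : List Int) : Prop := out = build_flip_idx_alt kpt_names
instance (kpt_names : List String) (out : List Int) : Decidable (Spec_build_flip_idx kpt_names out) := by unfold Spec_build_flip_idx; infer_instance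

-- ===== CLAIM (what is proved, stated in full; the proofs are below) =====
def Claim_equal_build_flip_idx : Prop := ∀ (kpt_names : List String), Dom_build_flip_idx kpt_names → Spec_build_flip_idx kpt_names (build_flip_idx kpt_names)

-- ===== LEMMAS AND PROOFS =====

-- the unique name a (base, side) key renders to: base ++ "_left"/"_right"
def bfiRender (k : String × Bool) : String :=
  String.ofList (k.1.toList ++ (if k.2 then "_left" else "_right").toList)

lemma bfi_not_both {m : List Char} (h1 : "_left".toList <:+ m) (h2 : "_right".toList <:+ m) : False := by
  rcases List.suffix_or_suffix_of_suffix h1 h2 with h | h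
  · exact absurd h (by decide)
  · exact absurd h (by decide)

lemma bfi_render_toList (b : String) (s : Bool) :
    (bfiRender (b, s)).toList = b.toList ++ (if s then "_left" else "_right").toList := by
  simp [bfiRender]

lemma bfi_ew_left (b : String) : PySem.Str.endswith (bfiRender (b, true)) "_left" = true := by
  rw [PySem.Str.endswith_eq, bfi_render_toList]
  exact (PySem.Chars.endswith_iff _ _).mpr ⟨b.toList, rfl⟩

lemma bfi_ew_right (b : String) : PySem.Str.endswith (bfiRender (b, false)) "_right" = true := by
  rw [PySem.Str.endswith_eq, bfi_render_toList]
  exact (PySem.Chars.endswith_iff _ _).mpr ⟨b.toList, rfl⟩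

lemma bfi_new_left (b : String) : PySem.Str.endswith (bfiRender (b, false)) "_left" = false := by
  cases h : PySem.Str.endswith (bfiRender (b, false)) "_left"
  · rfl
  · rw [PySem.Str.endswith_eq, bfi_render_toList] at h
    exact absurd ((PySem.Chars.endswith_iff _ _).mp h)
      (fun hs => bfi_not_both hs ⟨b.toList, rfl⟩)

lemma bfi_slice_left (b : String) :
    PySem.List.slice (bfiRender (b, true)).toList none (some (-5)) = b.toList := by
  rw [PySem.List.slice_to_neg_ofNat _ 5 (by omega), bfi_render_toList]
  have h5 : ((if true then "_left" else "_right").toList).length = 5 := by decide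
  rw [List.length_append, h5, Nat.add_sub_cancel, List.take_left' rfl]

lemma bfi_slice_right (b : String) :
    PySem.List.slice (bfiRender (b, false)).toList none (some (-6)) = b.toList := by
  rw [PySem.List.slice_to_neg_ofNat _ 6 (by omega), bfi_render_toList]
  have h6 : ((if false then "_left" else "_right").toList).length = 6 := by decide
  rw [List.length_append, h6, Nat.add_sub_cancel, List.take_left' rfl]

lemma bfi_parse_render (b : String) (s : Bool) : bfiParse (bfiRender (b, s)) = some (b, s) := by
  cases s
  · unfold bfiParse
    simp only [bfi_new_left b, bfi_ew_right b, Bool.false_eq_true, if_false, if_true]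
    rw [bfi_slice_right b]
    simp
  · unfold bfiParse
    simp only [bfi_ew_left b, if_true]
    rw [bfi_slice_left b]
    simp

lemma bfi_parse_eq_some {m : String} {k : String × Bool} (h : bfiParse m = some k) :
    m = bfiRender k := by
  unfold bfiParse at h
  split_ifs at h with h1 h2
  · rw [PySem.Str.endswith_eq] at h1
    obtain ⟨t, ht⟩ := (PySem.Chars.endswith_iff _ _).mp h1
    have hsl : PySem.List.slice m.toList none (some (-5)) = t := by
      rw [PySem.List.slice_to_neg_ofNat _ 5 (by omega), ← ht, List.length_append]
      have h5 : ("_left".toList).length = 5 := by decide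
      rw [h5, Nat.add_sub_cancel, List.take_left' rfl]
    rw [← Option.some_inj.mp h]
    unfold bfiRender
    simp only [hsl, String.toList_ofList, if_true]
    rw [ht]
    simp
  · rw [PySem.Str.endswith_eq] at h2
    obtain ⟨t, ht⟩ := (PySem.Chars.endswith_iff _ _).mp h2
    have hsl : PySem.List.slice m.toList none (some (-6)) = t := by
      rw [PySem.List.slice_to_neg_ofNat _ 6 (by omega), ← ht, List.length_append]
      have h6 : ("_right".toList).length = 6 := by decide
      rw [h6, Nat.add_sub_cancel, List.take_left' rfl]
    rw [← Option.some_inj.mp h]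
    unfold bfiRender
    simp only [hsl, String.toList_ofList, Bool.false_eq_true, if_false]
    rw [ht]
    simp

lemma bfi_parse_iff (m : String) (k : String × Bool) :
    bfiParse m = some k ↔ m = bfiRender k := by
  constructor
  · exact bfi_parse_eq_some
  · rintro rfl
    obtain ⟨b, s⟩ := k
    exact bfi_parse_render b s

lemma bfi_render_inj {k k' : String × Bool} (h : bfiRender k = bfiRender k') : k = k' := by
  have h1 : bfiParse (bfiRender k) = some k := (bfi_parse_iff _ _).mpr rfl
  have h2 : bfiParse (bfiRender k') = some k' := (bfi_parse_iff _ _).mpr rfl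
  rw [h, h2] at h1; exact (Option.some_inj.mp h1).symm

lemma bfi_counterpart_render (b : String) (s : Bool) :
    bfiCounterpart (bfiRender (b, s)) = some (bfiRender (b, !s)) := by
  cases s
  · unfold bfiCounterpart
    simp only [bfi_new_left b, bfi_ew_right b, Bool.false_eq_true, if_false, if_true]
    rw [bfi_slice_right b]
    simp [bfiRender]
  · unfold bfiCounterpart
    simp only [bfi_ew_left b, if_true]
    rw [bfi_slice_left b]
    simp [bfiRender]

lemma bfi_alias_some (n c : String) (h : bfiAliases.get? n = some c)
    (h1 : PySem.Str.endswith n "_left" = false)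
    (h2 : PySem.Str.endswith n "_right" = false) : False := by
  have hitems : bfiAliases.items = [("top_left", "top_right"), ("top_right", "top_left"),
      ("mid_left", "mid_right"), ("mid_right", "mid_left"),
      ("middle_left", "middle_right"), ("middle_right", "middle_left"),
      ("bottom_left", "bottom_right"), ("bottom_right", "bottom_left")] := by rfl
  have hm := PySem.Dict.mem_items_of_get?_eq_some bfiAliases h
  rw [hitems] at hm
  simp only [List.mem_cons, List.not_mem_nil, or_false, Prod.mk.injEq] at hm
  rcases hm with ⟨hn, -⟩ | ⟨hn, -⟩ | ⟨hn, -⟩ | ⟨hn, -⟩ | ⟨hn, -⟩ | ⟨hn, -⟩ | ⟨hn, -⟩ | ⟨hn, -⟩ <;>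
    subst hn <;>
    first
      | exact absurd h1 (by decide)
      | exact absurd h2 (by decide)

lemma bfi_dicts (l : List (Int × String)) :
    ∀ (d1 : PySem.Dict String Int) (d2 : PySem.Dict (String × Bool) Int),
    (∀ k, d1.get? (bfiRender k) = d2.get? k) →
    ∀ k, (l.foldl (fun d p => d.insert p.2 p.1) d1).get? (bfiRender k)
        = (l.foldl (fun d p => match bfiParse p.2 with | some k' => d.insert k' p.1 | none => d) d2).get? k := by
  induction l with
  | nil => intro d1 d2 h k; exact h k
  | cons p l ih =>
    intro d1 d2 h k
    simp only [List.foldl_cons]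
    rcases hp : bfiParse p.2 with _ | k0
    · exact ih (d1.insert p.2 p.1) d2 (fun k' => by
        have hne : bfiRender k' ≠ p.2 := fun he => by
          rw [(bfi_parse_iff p.2 k').mpr he.symm] at hp; cases hp
        rw [PySem.Dict.get?_insert_of_ne _ _ hne]; exact h k') k
    · have hn : p.2 = bfiRender k0 := bfi_parse_eq_some hp
      exact ih (d1.insert p.2 p.1) (d2.insert k0 p.1) (fun k' => by
        by_cases hk : k' = k0
        · subst hk; rw [hn, PySem.Dict.get?_insert_self, PySem.Dict.get?_insert_self]
        · have hne : bfiRender k' ≠ p.2 := fun he => hk (bfi_render_inj (hn ▸ he))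
          rw [PySem.Dict.get?_insert_of_ne _ _ hne, PySem.Dict.get?_insert_of_ne _ _ hk]
          exact h k') k

lemma bfi_point (d1 : PySem.Dict String Int) (d2 : PySem.Dict (String × Bool) Int)
    (hd : ∀ k, d1.get? (bfiRender k) = d2.get? k) (p : Int × String) :
    (match bfiCounterpart p.2 with
     | some c => if d1.contains c then (d1.get? c).getD 0 else p.1
     | none => p.1)
    = (match bfiParse p.2 with
       | some (base, side) => d2.getD (base, !side) p.1
       | none => p.1) := by
  rcases hp : bfiParse p.2 with _ | ⟨b, s⟩ <;> simp only []
  · have h1 : PySem.Str.endswith p.2 "_left" = false := by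
      cases hE : PySem.Str.endswith p.2 "_left"
      · rfl
      · unfold bfiParse at hp; rw [hE] at hp; simp at hp
    have h2 : PySem.Str.endswith p.2 "_right" = false := by
      cases hE : PySem.Str.endswith p.2 "_right"
      · rfl
      · unfold bfiParse at hp; rw [h1, hE] at hp; simp at hp
    have hc : bfiCounterpart p.2 = bfiAliases.get? p.2 := by
      simp only [bfiCounterpart, h1, h2, Bool.false_eq_true, if_false]
    rcases ha : bfiAliases.get? p.2 with _ | c
    · simp [hc, ha]
    · exact (bfi_alias_some p.2 c ha h1 h2).elim
  · have hn : p.2 = bfiRender (b, s) := bfi_parse_eq_some hp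
    have hcp : bfiCounterpart p.2 = some (bfiRender (b, !s)) := by
      rw [hn]; exact bfi_counterpart_render b s
    simp only [hcp]
    rw [PySem.Dict.contains_eq_isSome_get?, hd (b, !s), PySem.Dict.getD_eq_get?_getD]
    cases d2.get? (b, !s) <;> simp

lemma bfi_foldl_set (f : Int × String → Int) (xs : List String) :
    ∀ (pre rest : List Int), rest.length = xs.length →
    (PySem.List.enumerate xs (pre.length : Int)).foldl (fun acc p => acc.set p.1.toNat (f p)) (pre ++ rest)
      = pre ++ (PySem.List.enumerate xs (pre.length : Int)).map f := by
  induction xs with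
  | nil =>
    intro pre rest h
    rw [PySem.List.enumerate_nil]
    simp [List.length_eq_zero_iff.mp h]
  | cons x xs ih =>
    intro pre rest h
    rcases rest with _ | ⟨r0, rest⟩
    · simp at h
    rw [PySem.List.enumerate_cons]
    simp only [List.foldl_cons, List.map_cons, Int.toNat_natCast]
    have hset : (pre ++ r0 :: rest).set pre.length (f ((pre.length : Int), x))
        = (pre ++ [f ((pre.length : Int), x)]) ++ rest := by simp
    rw [hset]
    have hc : (pre.length : Int) + 1 = ((pre ++ [f ((pre.length : Int), x)]).length : Int) := by
      simp
    rw [hc, ih (pre ++ [f ((pre.length : Int), x)]) rest (by simp at h; omega)]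
    simp

-- ===== VERDICT (by name: the statement is the Claim_ definition above) =====
theorem build_flip_idx_spec : Claim_equal_build_flip_idx := by
  intro xs _
  unfold Spec_build_flip_idx
  simp only [build_flip_idx, build_flip_idx_alt]
  set d1 := (PySem.List.enumerate xs).foldl (fun d p => d.insert p.2 p.1) PySem.Dict.empty with hd1
  set d2 := (PySem.List.enumerate xs).foldl
      (fun d p => match bfiParse p.2 with | some k => d.insert k p.1 | none => d) PySem.Dict.empty with hd2
  have hdict : ∀ k, d1.get? (bfiRender k) = d2.get? k :=
    bfi_dicts (PySem.List.enumerate xs) PySem.Dict.empty PySem.Dict.empty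
      (fun _ => by rw [PySem.Dict.get?_empty, PySem.Dict.get?_empty])
  have hstep : (fun (flip : List Int) (p : Int × String) =>
      match bfiCounterpart p.2 with
      | some c => if d1.contains c then flip.set p.1.toNat ((d1.get? c).getD 0)
                  else flip.set p.1.toNat p.1
      | none => flip.set p.1.toNat p.1)
      = fun (flip : List Int) (p : Int × String) =>
          flip.set p.1.toNat (match bfiCounterpart p.2 with
            | some c => if d1.contains c then (d1.get? c).getD 0 else p.1
            | none => p.1) := by
    funext flip p
    rcases h : bfiCounterpart p.2 with _ | c <;> simp only
    split <;> rfl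
  rw [hstep]
  have happ := bfi_foldl_set
      (fun p => match bfiCounterpart p.2 with
        | some c => if d1.contains c then (d1.get? c).getD 0 else p.1
        | none => p.1) xs [] (PySem.List.pyRange 0 (xs.length : Int) 1)
      (by rw [PySem.List.length_pyRange_one]; simp)
  simp only [List.nil_append, List.length_nil, Nat.cast_zero] at happ
  rw [happ]
  exact List.map_congr_left (fun p _ => bfi_point d1 d2 hdict p)
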